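-- pv_equiv track=rewrite | github.com/ansible/shippable-migration-tool | migrate.py | yaml_transformer
-- ===== SOURCE A (Python) =====
-- def yaml_transformer(value: str) -> str:
--     """A YAML transformer for Ruamel that places a blank line between each top level section."""
--     lines = value.splitlines()
--     output = []
--
--     for line_no, line in enumerate(lines):
--         if line_no and not line.startswith(' '):
--             output.append('')
--
--         output.append(line)
--
--     return '\n'.join(output) + '\n'
-- ===== SOURCE B (Python) =====
-- def yaml_transformer(value: str) -> str:
--     """A YAML transformer for Ruamel that places a blank line between each top level section."""
--     lines = value.splitlines()
--     if not lines:
--         return '\n'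
--     done = []
--     cur = [lines[0]]
--     for line in lines[1:]:
--         if line.startswith(' '):
--             cur.append(line)
--         else:
--             done.append('\n'.join(cur))
--             cur = [line]
--     done.append('\n'.join(cur))
--     return '\n\n'.join(done) + '\n'
-- ===== Notes on version B (the rewrite author's own statement) =====
-- stated objective: alternative
-- what changed: B replaces A's enumerate loop that interleaves empty-string markers into one flat output list with a group-then-join decomposition: it partitions the lines into top-level sections (a new section starts at every non-indented line) and joins each section's join with a blank-line separator.
import Mathlib
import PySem

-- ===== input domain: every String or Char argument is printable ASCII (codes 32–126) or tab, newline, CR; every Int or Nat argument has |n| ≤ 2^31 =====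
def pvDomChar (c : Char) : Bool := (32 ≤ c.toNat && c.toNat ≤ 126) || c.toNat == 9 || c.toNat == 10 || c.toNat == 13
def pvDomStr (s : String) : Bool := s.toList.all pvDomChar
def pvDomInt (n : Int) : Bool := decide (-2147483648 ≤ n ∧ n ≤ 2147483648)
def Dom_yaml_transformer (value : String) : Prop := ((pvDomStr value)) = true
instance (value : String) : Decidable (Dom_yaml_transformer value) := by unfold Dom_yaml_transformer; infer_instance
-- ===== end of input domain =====

-- B replaces A's enumerate loop (which interleaves '' markers into one flat list) by a
-- group-into-sections-then-join decomposition; same cost, different structure.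

-- ===== PORT A =====
def yaml_transformer (value : String) : String :=
  let lines := PySem.Str.splitlines value
  let output := (PySem.List.enumerate lines).foldl
    (fun out (p : Int × String) =>
      let out := if p.1 ≠ 0 ∧ PySem.Str.startswith p.2 " " = false then out ++ [""] else out
      out ++ [p.2]) []
  PySem.Str.join "\n" output ++ "\n"

-- ===== PORT B =====
def yaml_transformer_alt (value : String) : String :=
  let lines := PySem.Str.splitlines value
  match lines with
  | [] => "\n"
  | l0 :: rest =>
    let st := rest.foldl
      (fun (st : List String × List String) line =>
        if PySem.Str.startswith line " " then (st.1, st.2 ++ [line])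
        else (st.1 ++ [PySem.Str.join "\n" st.2], [line]))
      ([], [l0])
    PySem.Str.join "\n\n" (st.1 ++ [PySem.Str.join "\n" st.2]) ++ "\n"

-- ===== PRECONDITION & SPEC =====
def Spec_yaml_transformer (value : String) (out : String) : Prop := out = yaml_transformer_alt value
instance (value : String) (out : String) : Decidable (Spec_yaml_transformer value out) := by unfold Spec_yaml_transformer; infer_instance

-- ===== CLAIM (what is proved, stated in full; the proofs are below) =====
def Claim_equal_yaml_transformer : Prop := ∀ (value : String), Dom_yaml_transformer value → Spec_yaml_transformer value (yaml_transformer value)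

-- ===== LEMMAS AND PROOFS =====

-- the per-line contribution of A's loop after the first line
def pvF (l : String) : List String :=
  if PySem.Str.startswith l " " then [l] else ["", l]

theorem sjoin_singleton (sep a : String) : PySem.Str.join sep [a] = a := by
  apply String.toList_inj.mp
  simp [PySem.Str.toList_join, PySem.Chars.join_singleton]

theorem cjoin_cons_ne (sep x : List Char) (L : List (List Char)) (h : L ≠ []) :
    PySem.Chars.join sep (x :: L) = x ++ sep ++ PySem.Chars.join sep L := by
  cases L with
  | nil => exact absurd rfl h
  | cons y ys => exact PySem.Chars.join_cons_cons sep x y ys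

theorem sjoin_cons_ne (sep x : String) (L : List String) (h : L ≠ []) :
    PySem.Str.join sep (x :: L) = x ++ sep ++ PySem.Str.join sep L := by
  apply String.toList_inj.mp
  simp only [PySem.Str.toList_join, List.map_cons, String.toList_append]
  rw [cjoin_cons_ne]
  simp [h]

-- merging the last two pieces of a join
theorem sjoin_merge2 (sep a b : String) (xs : List String) :
    PySem.Str.join sep (xs ++ [a, b]) = PySem.Str.join sep (xs ++ [a ++ sep ++ b]) := by
  induction xs with
  | nil =>
      simp only [List.nil_append]
      rw [sjoin_cons_ne sep a [b] (by simp), sjoin_singleton, sjoin_singleton]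
  | cons x xs ih =>
      rw [List.cons_append, List.cons_append,
        sjoin_cons_ne sep x (xs ++ [a, b]) (by simp),
        sjoin_cons_ne sep x (xs ++ [a ++ sep ++ b]) (by simp), ih]

-- a '' element inserted under join "\n" is exactly a "\n\n" separator
theorem sjoin_blank (cur ys : List String) (hc : cur ≠ []) (hy : ys ≠ []) :
    PySem.Str.join "\n" cur ++ "\n\n" ++ PySem.Str.join "\n" ys
      = PySem.Str.join "\n" (cur ++ "" :: ys) := by
  induction cur with
  | nil => exact absurd rfl hc
  | cons x cur ih =>
      cases cur with
      | nil =>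
          rw [sjoin_singleton, List.singleton_append,
            sjoin_cons_ne "\n" x ("" :: ys) (by simp),
            sjoin_cons_ne "\n" "" ys hy]
          apply String.toList_inj.mp
          simp [String.toList_append]
      | cons y cur' =>
          rw [sjoin_cons_ne "\n" x (y :: cur') (by simp), List.cons_append,
            sjoin_cons_ne "\n" x ((y :: cur') ++ "" :: ys) (by simp),
            ← ih (by simp)]
          apply String.toList_inj.mp
          simp [String.toList_append]

-- A's loop, after the first line, appends pvF of each line
theorem aloop_eq (rest : List String) : ∀ (s : Int) (out : List String), 1 ≤ s →
    (PySem.List.enumerate rest s).foldl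
      (fun out (p : Int × String) =>
        (if p.1 ≠ 0 ∧ PySem.Str.startswith p.2 " " = false then out ++ [""] else out) ++ [p.2]) out
      = out ++ rest.flatMap pvF := by
  induction rest with
  | nil => intro s out _; simp [PySem.List.enumerate_nil]
  | cons l rest ih =>
      intro s out hs
      rw [PySem.List.enumerate_cons, List.foldl_cons, ih (s + 1) _ (by omega)]
      by_cases h : PySem.Str.startswith l " " = true
      · have h' : PySem.Chars.startswith l.toList [' '] = true := by simpa using h
        simp [pvF, h']
      · have h' : PySem.Chars.startswith l.toList [' '] = false := by
          simpa using eq_false_of_ne_true h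
        rw [if_pos ⟨(by omega : s ≠ 0), eq_false_of_ne_true h⟩]
        simp [pvF, h']

-- B's loop invariant: the sections join to the same string as cur followed by A's tail
theorem bloop_eq (rest : List String) : ∀ (done cur : List String), cur ≠ [] →
    PySem.Str.join "\n\n"
      ((rest.foldl
          (fun (st : List String × List String) line =>
            if PySem.Str.startswith line " " then (st.1, st.2 ++ [line])
            else (st.1 ++ [PySem.Str.join "\n" st.2], [line])) (done, cur)).1
        ++ [PySem.Str.join "\n"
            (rest.foldl
              (fun (st : List String × List String) line =>
                if PySem.Str.startswith line " " then (st.1, st.2 ++ [line])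
                else (st.1 ++ [PySem.Str.join "\n" st.2], [line])) (done, cur)).2])
    = PySem.Str.join "\n\n" (done ++ [PySem.Str.join "\n" (cur ++ rest.flatMap pvF)]) := by
  induction rest with
  | nil => intro done cur _; simp
  | cons l rest ih =>
      intro done cur hc
      by_cases h : PySem.Str.startswith l " " = true
      · rw [List.foldl_cons]
        simp only [h, reduceIte]
        rw [ih done (cur ++ [l]) (by simp)]
        have h' : PySem.Chars.startswith l.toList [' '] = true := by simpa using h
        simp [pvF, h']
      · rw [List.foldl_cons]
        simp only [eq_false_of_ne_true h, Bool.false_eq_true, if_false]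
        rw [ih (done ++ [PySem.Str.join "\n" cur]) [l] (by simp)]
        have h' : PySem.Chars.startswith l.toList [' '] = false := by
          simpa using eq_false_of_ne_true h
        have hflat : cur ++ (l :: rest).flatMap pvF = cur ++ "" :: (l :: rest.flatMap pvF) := by
          simp [pvF, h']
        rw [(List.singleton_append : [l] ++ rest.flatMap pvF = _),
          List.append_assoc done [PySem.Str.join "\n" cur], List.singleton_append,
          hflat, ← sjoin_blank cur (l :: rest.flatMap pvF) hc (by simp), ← sjoin_merge2]

-- ===== VERDICT (by name: the statement is the Claim_ definition above) =====
theorem yaml_transformer_spec : Claim_equal_yaml_transformer := by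
  intro value _
  unfold Spec_yaml_transformer yaml_transformer yaml_transformer_alt
  cases hl : PySem.Str.splitlines value with
  | nil =>
      simp only [PySem.List.enumerate_nil, List.foldl_nil]
      decide
  | cons l0 rest =>
      simp only [PySem.List.enumerate_cons, List.foldl_cons, zero_add]
      simp only [ne_eq, not_true_eq_false, false_and, if_false, List.nil_append]
      rw [aloop_eq rest 1 [l0] le_rfl, bloop_eq rest [] [l0] (by simp),
        List.nil_append, sjoin_singleton, List.singleton_append]
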